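-- pv_equiv track=rewrite | github.com/ashleyharris-maptek-com-au/SpatialCompetenceBenchmark | 37.py | rotate_shape_90
-- ===== SOURCE A (Python) =====
-- def rotate_shape_90(cubes, axis):
--   """Rotate a shape 90 degrees around the given axis."""
--   result = []
--   for x, y, z in cubes:
--     if axis == 'x':
--       result.append((x, -z, y))
--     elif axis == 'y':
--       result.append((z, y, -x))
--     elif axis == 'z':
--       result.append((-y, x, z))
--   return result
-- ===== SOURCE B (Python) =====
-- def _cycle(cubes):
--   """One cyclic shift of every coordinate triple: (x, y, z) -> (y, z, x)."""
--   return [(y, z, x) for x, y, z in cubes]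
--
-- def rotate_shape_90(cubes, axis):
--   """Rotate a shape 90 degrees around the given axis.
--
--   Any axis rotation is the base x-rotation conjugated by cyclic coordinate
--   shifts: R_axis = C^(3-i) . R_x . C^i where C cycles (x,y,z)->(y,z,x) and
--   i is the axis position in (x, y, z).
--   """
--   try:
--     i = ('x', 'y', 'z').index(axis)
--   except ValueError:
--     return []
--   shifted = cubes
--   for _ in range(i):
--     shifted = _cycle(shifted)
--   rotated = [(x, -z, y) for x, y, z in shifted]  # base quarter turn about x
--   for _ in range((3 - i) % 3):
--     rotated = _cycle(rotated)
--   return rotated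
-- ===== Notes on version B (the rewrite author's own statement) =====
-- stated objective: alternative
-- what changed: Instead of three hardcoded per-axis output tuples in an if/elif loop, B factors every rotation as the single base x-rotation conjugated by cyclic coordinate shifts (R_axis = C^(3-i) . R_x . C^i), applied as staged whole-list passes; unknown axes hit the tuple .index ValueError and return [].
import Mathlib
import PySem

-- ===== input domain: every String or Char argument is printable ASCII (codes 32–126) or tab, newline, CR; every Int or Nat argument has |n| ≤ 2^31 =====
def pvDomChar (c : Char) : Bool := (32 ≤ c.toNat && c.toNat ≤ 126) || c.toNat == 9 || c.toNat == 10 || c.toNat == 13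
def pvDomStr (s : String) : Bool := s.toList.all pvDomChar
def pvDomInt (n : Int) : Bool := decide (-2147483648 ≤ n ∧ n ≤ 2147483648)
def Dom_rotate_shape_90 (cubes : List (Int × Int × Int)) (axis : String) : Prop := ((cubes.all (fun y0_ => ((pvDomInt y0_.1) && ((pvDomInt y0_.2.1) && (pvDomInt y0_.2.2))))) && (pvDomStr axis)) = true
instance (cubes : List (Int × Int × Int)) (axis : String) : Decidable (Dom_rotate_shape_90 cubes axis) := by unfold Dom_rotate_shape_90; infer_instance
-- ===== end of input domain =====

-- B factors each axis rotation as the base x-rotation conjugated by cyclic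
-- coordinate shifts, applied as staged whole-list passes (objective: alternative).

-- ===== PORT A =====
def rotate_shape_90 (cubes : List (Int × Int × Int)) (axis : String) : List (Int × Int × Int) :=
  cubes.foldl (fun result cube =>
    let (x, y, z) := cube
    if axis == "x" then result ++ [(x, -z, y)]
    else if axis == "y" then result ++ [(z, y, -x)]
    else if axis == "z" then result ++ [(-y, x, z)]
    else result) []

-- ===== PORT B =====
-- _cycle: one cyclic shift of every coordinate triple
def pvCycle (cubes : List (Int × Int × Int)) : List (Int × Int × Int) :=
  cubes.map (fun cube => let (x, y, z) := cube; (y, z, x))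

def rotate_shape_90_alt (cubes : List (Int × Int × Int)) (axis : String) : List (Int × Int × Int) :=
  -- ('x','y','z').index(axis); ValueError branch returns []
  match PySem.List.index? ["x", "y", "z"] axis with
  | none => []
  | some i =>
    let shifted := (List.range i).foldl (fun s _ => pvCycle s) cubes
    let rotated := shifted.map (fun cube => let (x, y, z) := cube; (x, -z, y))
    (List.range ((3 - i) % 3)).foldl (fun s _ => pvCycle s) rotated

-- ===== PRECONDITION & SPEC =====
def Spec_rotate_shape_90 (cubes : List (Int × Int × Int)) (axis : String) (out : List (Int × Int × Int)) : Prop := out = rotate_shape_90_alt cubes axis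
instance (cubes : List (Int × Int × Int)) (axis : String) (out : List (Int × Int × Int)) : Decidable (Spec_rotate_shape_90 cubes axis out) := by unfold Spec_rotate_shape_90; infer_instance

-- ===== CLAIM (what is proved, stated in full; the proofs are below) =====
def Claim_equal_rotate_shape_90 : Prop := ∀ (cubes : List (Int × Int × Int)) (axis : String), Dom_rotate_shape_90 cubes axis → Spec_rotate_shape_90 cubes axis (rotate_shape_90 cubes axis)

-- ===== LEMMAS AND PROOFS =====

-- A's append-accumulating fold is acc ++ map f when the same branch fires every step.
theorem pv_foldl_append_map (f : (Int × Int × Int) → (Int × Int × Int)) :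
    ∀ (cubes : List (Int × Int × Int)) (acc : List (Int × Int × Int)),
      cubes.foldl (fun r c => r ++ [f c]) acc = acc ++ cubes.map f := by
  intro cubes
  induction cubes with
  | nil => simp
  | cons c t ih => intro acc; simp [List.foldl, ih]

-- ===== VERDICT (by name: the statement is the Claim_ definition above) =====
theorem rotate_shape_90_spec : Claim_equal_rotate_shape_90 := by
  intro cubes axis _
  unfold Spec_rotate_shape_90 rotate_shape_90
  by_cases hx : axis = "x"
  · subst hx
    have hi : PySem.List.index? ["x", "y", "z"] "x" = some 0 := rfl
    simp only [rotate_shape_90_alt, hi, List.range_zero, List.foldl_nil,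
      Nat.sub_zero, Nat.mod_self]
    simpa using pv_foldl_append_map (fun c => (c.1, -c.2.2, c.2.1)) cubes []
  · by_cases hy : axis = "y"
    · subst hy
      have hi : PySem.List.index? ["x", "y", "z"] "y" = some 1 := rfl
      simp only [rotate_shape_90_alt, hi, show List.range 1 = [0] from rfl,
        show (3 - 1) % 3 = 2 from rfl, show List.range 2 = [0, 1] from rfl,
        List.foldl_cons, List.foldl_nil]
      simpa [pvCycle, List.map_map, Function.comp] using
        pv_foldl_append_map (fun c => (c.2.2, c.2.1, -c.1)) cubes []
    · by_cases hz : axis = "z"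
      · subst hz
        have hi : PySem.List.index? ["x", "y", "z"] "z" = some 2 := rfl
        simp only [rotate_shape_90_alt, hi, show List.range 2 = [0, 1] from rfl,
          show (3 - 2) % 3 = 1 from rfl, show List.range 1 = [0] from rfl,
          List.foldl_cons, List.foldl_nil]
        simpa [pvCycle, List.map_map, Function.comp] using
          pv_foldl_append_map (fun c => (-c.2.1, c.1, c.2.2)) cubes []
      · have hd : List.idxOf? axis ["x", "y", "z"] = none := by
          simp [List.idxOf?, List.findIdx?, List.findIdx?.go,
            Ne.symm hx, Ne.symm hy, Ne.symm hz]
        simp [rotate_shape_90_alt, PySem.List.index?, hd, hx, hy, hz, List.foldl_fixed]
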